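-- pv_equiv track=rewrite | github.com/dsw7/MetAromatic | MetAromatic/load_resources.py | _is_valid_pdb_file
-- ===== SOURCE A (Python) =====
-- def _is_valid_pdb_file(file_content: list[str]) -> bool:
--     tags = {
--         "HEADER": False,
--         "TITLE": False,
--         "REMARK": False,
--         "ATOM": False,
--         "HETATM": False,
--         "END": False,
--     }
--
--     for line in file_content:
--         tag = line[:6].strip()
--
--         if tag in tags:
--             tags[tag] = True
--
--         if all(tags.values()):
--             return True
--
--     return False
-- ===== SOURCE B (Python) =====
-- def _is_valid_pdb_file(file_content: list[str]) -> bool: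
--     def has_tag(tag):
--         return any(line[:6].strip() == tag for line in file_content)
--
--     return all(has_tag(t) for t in ("HEADER", "TITLE", "REMARK", "ATOM", "HETATM", "END"))
-- ===== Notes on version B (the rewrite author's own statement) =====
-- stated objective: alternative
-- what changed: Inverts the traversal: instead of A's single line-major pass maintaining a dict of six flags with a per-line all() over the flag values, B does one early-exiting any() scan of the file per required tag (tag-major staged passes) and combines the six answers with all().
import Mathlib
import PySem

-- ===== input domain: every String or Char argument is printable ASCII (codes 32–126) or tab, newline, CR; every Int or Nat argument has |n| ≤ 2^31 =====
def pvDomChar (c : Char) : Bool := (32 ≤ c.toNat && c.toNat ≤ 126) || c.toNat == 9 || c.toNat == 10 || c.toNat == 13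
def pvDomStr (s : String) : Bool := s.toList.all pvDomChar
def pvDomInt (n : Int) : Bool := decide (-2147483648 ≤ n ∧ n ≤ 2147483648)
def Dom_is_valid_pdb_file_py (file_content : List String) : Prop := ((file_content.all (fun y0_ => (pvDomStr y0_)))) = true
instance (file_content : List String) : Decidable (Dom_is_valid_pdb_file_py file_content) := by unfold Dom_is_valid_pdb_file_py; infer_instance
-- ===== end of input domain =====

-- B inverts the traversal: one early-exiting any() scan of the file per required tag (tag-major
-- staged passes) combined with all(), instead of A's line-major flag-dict pass (objective: alternative).

-- ===== PORT A =====
-- tag = line[:6].strip()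
def pvTagA (line : String) : String := PySem.Str.strip (PySem.Str.slice line none (some 6))

-- the 'for line in file_content' loop over the dict of booleans, with the early 'return True'
def pvLoopA : PySem.Dict String Bool → List String → Bool
  | _, [] => false
  | tags, line :: rest =>
    let tag := pvTagA line
    let tags' := if tags.contains tag then tags.insert tag true else tags
    if tags'.values.all (fun b => b) then true else pvLoopA tags' rest

def is_valid_pdb_file_py (file_content : List String) : Bool :=
  pvLoopA (PySem.Dict.ofList
    [("HEADER", false), ("TITLE", false), ("REMARK", false),
     ("ATOM", false), ("HETATM", false), ("END", false)]) file_content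

-- ===== PORT B =====
def pvTagB (line : String) : String := PySem.Str.strip (PySem.Str.slice line none (some 6))

-- has_tag(tag) = any(line[:6].strip() == tag for line in file_content)
def pvHasTag (file_content : List String) (tag : String) : Bool :=
  file_content.any (fun line => pvTagB line == tag)

def is_valid_pdb_file_py_alt (file_content : List String) : Bool :=
  (["HEADER", "TITLE", "REMARK", "ATOM", "HETATM", "END"] : List String).all
    (fun t => pvHasTag file_content t)

-- ===== PRECONDITION & SPEC =====
def Spec_is_valid_pdb_file_py (file_content : List String) (out : Bool) : Prop := out = is_valid_pdb_file_py_alt file_content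
instance (file_content : List String) (out : Bool) : Decidable (Spec_is_valid_pdb_file_py file_content out) := by unfold Spec_is_valid_pdb_file_py; infer_instance

-- ===== CLAIM (what is proved, stated in full; the proofs are below) =====
def Claim_equal_is_valid_pdb_file_py : Prop := ∀ (file_content : List String), Dom_is_valid_pdb_file_py file_content → Spec_is_valid_pdb_file_py file_content (is_valid_pdb_file_py file_content)

-- ===== LEMMAS AND PROOFS =====

-- A's dict state, parametrised by its six boolean values
def pvDict6 (b1 b2 b3 b4 b5 b6 : Bool) : PySem.Dict String Bool :=
  PySem.Dict.mk [("HEADER", b1), ("TITLE", b2), ("REMARK", b3),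
                 ("ATOM", b4), ("HETATM", b5), ("END", b6)]

lemma pvContains6 (t : String) (b1 b2 b3 b4 b5 b6 : Bool) :
    (pvDict6 b1 b2 b3 b4 b5 b6).contains t =
      decide (t ∈ (["HEADER", "TITLE", "REMARK", "ATOM", "HETATM", "END"] : List String)) := by
  simp only [pvDict6, PySem.Dict.contains_mk, List.any_cons, List.any_nil, Bool.or_false,
    List.mem_cons, List.not_mem_nil, or_false]
  rw [Bool.eq_iff_iff]
  simp only [Bool.or_eq_true, beq_iff_eq, decide_eq_true_eq]
  tauto

lemma pvValues6 (b1 b2 b3 b4 b5 b6 : Bool) :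
    ((pvDict6 b1 b2 b3 b4 b5 b6).values.all (fun b => b)) = (b1 && b2 && b3 && b4 && b5 && b6) := by
  simp [pvDict6, PySem.Dict.values_mk, Bool.and_assoc]

lemma pvInsert6_1 (b1 b2 b3 b4 b5 b6 : Bool) :
    (pvDict6 b1 b2 b3 b4 b5 b6).insert "HEADER" true = pvDict6 true b2 b3 b4 b5 b6 := by
  simp [pvDict6, PySem.Dict.insert]

lemma pvInsert6_2 (b1 b2 b3 b4 b5 b6 : Bool) :
    (pvDict6 b1 b2 b3 b4 b5 b6).insert "TITLE" true = pvDict6 b1 true b3 b4 b5 b6 := by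
  simp [pvDict6, PySem.Dict.insert]

lemma pvInsert6_3 (b1 b2 b3 b4 b5 b6 : Bool) :
    (pvDict6 b1 b2 b3 b4 b5 b6).insert "REMARK" true = pvDict6 b1 b2 true b4 b5 b6 := by
  simp [pvDict6, PySem.Dict.insert]

lemma pvInsert6_4 (b1 b2 b3 b4 b5 b6 : Bool) :
    (pvDict6 b1 b2 b3 b4 b5 b6).insert "ATOM" true = pvDict6 b1 b2 b3 true b5 b6 := by
  simp [pvDict6, PySem.Dict.insert]

lemma pvInsert6_5 (b1 b2 b3 b4 b5 b6 : Bool) :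
    (pvDict6 b1 b2 b3 b4 b5 b6).insert "HETATM" true = pvDict6 b1 b2 b3 b4 true b6 := by
  simp [pvDict6, PySem.Dict.insert]

lemma pvInsert6_6 (b1 b2 b3 b4 b5 b6 : Bool) :
    (pvDict6 b1 b2 b3 b4 b5 b6).insert "END" true = pvDict6 b1 b2 b3 b4 b5 true := by
  simp [pvDict6, PySem.Dict.insert]

-- invariant of A's loop: while some required tag is still unseen, the loop succeeds exactly
-- when every still-missing tag occurs among the stripped 6-char prefixes of the lines
set_option maxHeartbeats 1000000 in
lemma pvLoopA_eq (lines : List String) : ∀ b1 b2 b3 b4 b5 b6 : Bool,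
    (b1 && b2 && b3 && b4 && b5 && b6) = false →
    pvLoopA (pvDict6 b1 b2 b3 b4 b5 b6) lines =
      ((b1 || decide ("HEADER" ∈ lines.map pvTagA)) &&
       (b2 || decide ("TITLE" ∈ lines.map pvTagA)) &&
       (b3 || decide ("REMARK" ∈ lines.map pvTagA)) &&
       (b4 || decide ("ATOM" ∈ lines.map pvTagA)) &&
       (b5 || decide ("HETATM" ∈ lines.map pvTagA)) &&
       (b6 || decide ("END" ∈ lines.map pvTagA))) := by
  induction lines with
  | nil =>
    intro b1 b2 b3 b4 b5 b6 h
    simpa [pvLoopA] using h.symm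
  | cons line rest ih =>
    intro b1 b2 b3 b4 b5 b6 h
    simp only [pvLoopA, pvContains6, List.map_cons, List.mem_cons]
    by_cases h1 : pvTagA line = "HEADER"
    · by_cases hb : (b2 && b3 && b4 && b5 && b6) = true
      · simp_all [pvValues6, pvInsert6_1]
      · have hr := ih true b2 b3 b4 b5 b6 (by simpa using hb)
        simp [h1, pvInsert6_1, pvValues6, hb, hr]
    by_cases h2 : pvTagA line = "TITLE"
    · by_cases hb : (b1 && b3 && b4 && b5 && b6) = true
      · simp_all [pvValues6, pvInsert6_2]
      · have hr := ih b1 true b3 b4 b5 b6 (by simp_all)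
        simp [h2, pvInsert6_2, pvValues6, hb, hr]
    by_cases h3 : pvTagA line = "REMARK"
    · by_cases hb : (b1 && b2 && b4 && b5 && b6) = true
      · simp_all [pvValues6, pvInsert6_3]
      · have hr := ih b1 b2 true b4 b5 b6 (by simp_all)
        simp [h3, pvInsert6_3, pvValues6, hb, hr]
    by_cases h4 : pvTagA line = "ATOM"
    · by_cases hb : (b1 && b2 && b3 && b5 && b6) = true
      · simp_all [pvValues6, pvInsert6_4]
      · have hr := ih b1 b2 b3 true b5 b6 (by simp_all)
        simp [h4, pvInsert6_4, pvValues6, hb, hr]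
    by_cases h5 : pvTagA line = "HETATM"
    · by_cases hb : (b1 && b2 && b3 && b4 && b6) = true
      · simp_all [pvValues6, pvInsert6_5]
      · have hr := ih b1 b2 b3 b4 true b6 (by simp_all)
        simp [h5, pvInsert6_5, pvValues6, hb, hr]
    by_cases h6 : pvTagA line = "END"
    · by_cases hb : (b1 && b2 && b3 && b4 && b5) = true
      · simp_all [pvValues6, pvInsert6_6]
      · have hr := ih b1 b2 b3 b4 b5 true (by simp_all)
        simp [h6, pvInsert6_6, pvValues6, hb, hr]
    · have hr := ih b1 b2 b3 b4 b5 b6 h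
      have hc : ¬ (decide (pvTagA line = "HEADER" ∨ pvTagA line = "TITLE" ∨ pvTagA line = "REMARK" ∨
          pvTagA line = "ATOM" ∨ pvTagA line = "HETATM" ∨ pvTagA line = "END" ∨
          pvTagA line ∈ ([] : List String)) = true) := by
        simp [h1, h2, h3, h4, h5, h6]
      rw [if_neg hc, pvValues6, if_neg (by rw [h]; exact Bool.false_ne_true), hr]
      simp [Ne.symm h1, Ne.symm h2, Ne.symm h3, Ne.symm h4, Ne.symm h5, Ne.symm h6]

-- each per-tag any() scan answers exactly the membership of that tag among the stripped prefixes
lemma pvHasTag_eq (fc : List String) (t : String) :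
    pvHasTag fc t = decide (t ∈ fc.map pvTagA) := by
  rw [Bool.eq_iff_iff]
  simp only [pvHasTag, pvTagB, pvTagA, List.any_eq_true, List.mem_map, beq_iff_eq,
    decide_eq_true_eq]

-- B unfolded: the six staged scans are the conjunction of the six memberships
lemma pvAlt_eq (file_content : List String) :
    is_valid_pdb_file_py_alt file_content =
      ((false || decide ("HEADER" ∈ file_content.map pvTagA)) &&
       (false || decide ("TITLE" ∈ file_content.map pvTagA)) &&
       (false || decide ("REMARK" ∈ file_content.map pvTagA)) &&
       (false || decide ("ATOM" ∈ file_content.map pvTagA)) &&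
       (false || decide ("HETATM" ∈ file_content.map pvTagA)) &&
       (false || decide ("END" ∈ file_content.map pvTagA))) := by
  simp [is_valid_pdb_file_py_alt, pvHasTag_eq, Bool.and_assoc]

-- A's initial dict literal is the all-false state
lemma pvInit_eq : PySem.Dict.ofList
    [("HEADER", false), ("TITLE", false), ("REMARK", false),
     ("ATOM", false), ("HETATM", false), ("END", false)] = pvDict6 false false false false false false := by
  decide

-- ===== VERDICT (by name: the statement is the Claim_ definition above) =====
theorem is_valid_pdb_file_py_spec : Claim_equal_is_valid_pdb_file_py := by
  intro fc _
  show is_valid_pdb_file_py fc = is_valid_pdb_file_py_alt fc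
  rw [pvAlt_eq, is_valid_pdb_file_py, pvInit_eq]
  exact pvLoopA_eq fc false false false false false false rfl
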